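-- pv_equiv track=rewrite | github.com/karchern/FISH_probes | fish_probes/predict_probes.py | find_kmers
-- ===== SOURCE A (Python) =====
-- def DnaCheck(sequence):
--     return all(base.upper() in ('A', 'C', 'T', 'G', 'U') for base in sequence)
--
-- def find_kmers(string,k):
--     res = {}
--     res_N = {}
--     for x in range(len(string)+1-k):
--         kmer = string[x:x+k]
--         # we select only if they contain nucleotide sequences
--         if DnaCheck(kmer):
--             res[kmer] = res.get(kmer, 0) + 1
--         else:
--             res_N[kmer] = res_N.get(kmer, 0) + 1
--     return res, res_N
-- ===== SOURCE B (Python) =====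
-- def find_kmers(string, k):
--     # staged: list every window, partition by DNA-validity, then tally each side
--     kmers = [string[x:x+k] for x in range(len(string) + 1 - k)]
--     BASES = {'A', 'C', 'T', 'G', 'U'}
--     def is_dna(w):
--         return all(c.upper() in BASES for c in w)
--     def tally(ws):
--         d = {}
--         for w in ws:
--             d[w] = d.get(w, 0) + 1
--         return d
--     return tally([w for w in kmers if is_dna(w)]), tally([w for w in kmers if not is_dna(w)])
-- ===== Notes on version B (the rewrite author's own statement) =====
-- stated objective: alternative
-- what changed: B replaces A's single loop that interleaves classification with two-dict updates by a staged pipeline: materialise the list of all windows, split it into valid/invalid sublists by two filters, and tally each sublist into its dict with a separate counting fold.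
import Mathlib
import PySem

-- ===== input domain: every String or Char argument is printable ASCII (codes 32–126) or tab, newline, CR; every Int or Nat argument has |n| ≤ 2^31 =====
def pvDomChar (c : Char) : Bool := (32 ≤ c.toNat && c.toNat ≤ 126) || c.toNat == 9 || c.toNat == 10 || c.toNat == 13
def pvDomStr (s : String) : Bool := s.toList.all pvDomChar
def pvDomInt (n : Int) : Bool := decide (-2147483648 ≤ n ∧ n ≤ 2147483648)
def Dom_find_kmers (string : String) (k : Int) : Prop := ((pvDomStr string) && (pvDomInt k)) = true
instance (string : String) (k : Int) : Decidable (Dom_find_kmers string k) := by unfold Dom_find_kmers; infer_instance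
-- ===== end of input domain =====

-- B restructures A's single classify-and-update loop into a staged pipeline (list all windows,
-- partition by validity with two filters, tally each sublist); same cost, no argument mutated.

-- ===== PORT A =====
def DnaCheckPort (sequence : String) : Bool :=
  sequence.toList.all (fun base => (['A', 'C', 'T', 'G', 'U'] : List Char).contains (PySem.Chars.upperChar base))

def find_kmers (string : String) (k : Int) : (List (String × Int)) × (List (String × Int)) :=
  let p := (PySem.List.pyRange 0 (PySem.Str.len string + 1 - k) 1).foldl
    (fun (st : PySem.Dict String Int × PySem.Dict String Int) x =>
      let kmer := PySem.Str.slice string (some x) (some (x + k))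
      if DnaCheckPort kmer then
        (st.1.insert kmer (st.1.getD kmer 0 + 1), st.2)
      else
        (st.1, st.2.insert kmer (st.2.getD kmer 0 + 1)))
    ((PySem.Dict.empty : PySem.Dict String Int), (PySem.Dict.empty : PySem.Dict String Int))
  (p.1.items, p.2.items)

-- ===== PORT B =====
def pvBases : PySem.Set Char := PySem.Set.ofList ['A', 'C', 'T', 'G', 'U']

def pvIsDna (w : String) : Bool :=
  w.toList.all (fun c => PySem.Set.contains pvBases (PySem.Chars.upperChar c))

def pvTally (ws : List String) : PySem.Dict String Int :=
  ws.foldl (fun d w => d.insert w (d.getD w 0 + 1)) (PySem.Dict.empty : PySem.Dict String Int)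

def find_kmers_alt (string : String) (k : Int) : (List (String × Int)) × (List (String × Int)) :=
  let kmers := (PySem.List.pyRange 0 (PySem.Str.len string + 1 - k) 1).map
    (fun x => PySem.Str.slice string (some x) (some (x + k)))
  ((pvTally (kmers.filter (fun w => pvIsDna w))).items,
   (pvTally (kmers.filter (fun w => !pvIsDna w))).items)

-- ===== PRECONDITION & SPEC =====
def Spec_find_kmers (string : String) (k : Int) (out : (List (String × Int)) × (List (String × Int))) : Prop := out = find_kmers_alt string k
instance (string : String) (k : Int) (out : (List (String × Int)) × (List (String × Int))) : Decidable (Spec_find_kmers string k out) := by unfold Spec_find_kmers; infer_instance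

-- ===== CLAIM (what is proved, stated in full; the proofs are below) =====
def Claim_equal_find_kmers : Prop := ∀ (string : String) (k : Int), Dom_find_kmers string k → Spec_find_kmers string k (find_kmers string k)

-- ===== LEMMAS AND PROOFS =====

-- tally continued from an arbitrary dict (pvTally = pvTallyFrom empty)
def pvTallyFrom (d : PySem.Dict String Int) (ws : List String) : PySem.Dict String Int :=
  ws.foldl (fun d w => d.insert w (d.getD w 0 + 1)) d

theorem pvIsDna_eq_DnaCheckPort : pvIsDna = DnaCheckPort := by
  funext w
  rfl

-- A's interleaved two-dict fold over the index list is the pair of tallies of the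
-- two filtered sublists of the mapped window list.
theorem main_fold (p : String → Bool) (g : Int → String) (l : List Int)
    (d1 d2 : PySem.Dict String Int) :
    l.foldl (fun (st : PySem.Dict String Int × PySem.Dict String Int) x =>
        if p (g x) then (st.1.insert (g x) (st.1.getD (g x) 0 + 1), st.2)
        else (st.1, st.2.insert (g x) (st.2.getD (g x) 0 + 1))) (d1, d2)
      = (pvTallyFrom d1 ((l.map g).filter (fun w => p w)),
         pvTallyFrom d2 ((l.map g).filter (fun w => !p w))) := by
  induction l generalizing d1 d2 with
  | nil => simp [pvTallyFrom]
  | cons x l ih =>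
    by_cases h : p (g x) = true <;>
      simp [List.foldl, h, ih, pvTallyFrom]

-- ===== VERDICT (by name: the statement is the Claim_ definition above) =====
theorem find_kmers_spec : Claim_equal_find_kmers := by
  intro string k _hd
  unfold Spec_find_kmers find_kmers find_kmers_alt
  dsimp only
  rw [main_fold DnaCheckPort (fun x => PySem.Str.slice string (some x) (some (x + k)))]
  simp [pvTally, pvTallyFrom, pvIsDna_eq_DnaCheckPort]
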